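-- pv_equiv track=rewrite | github.com/Sukhdevkaushik/PythonCode | basic/reverse_a_string.py | consecutive_num
-- ===== SOURCE A (Python) =====
-- def consecutive_num(blocks, k):
--     curr_count = 0
--     str_len = len(blocks)
--     sum = str_len
--     for i in range(str_len - k  + 1):
--         curr_count = 0
--         for j in range(i, i + k):
--             if blocks[j] == "w":
--                 curr_count += 1
--         sum = min(sum, curr_count)
--     return sum
-- ===== SOURCE B (Python) =====
-- def consecutive_num(blocks, k):
--     n = len(blocks)
--     if k <= 0:
--         return 0
--     pref = [0]
--     for ch in blocks:
--         pref.append(pref[-1] + (ch == "w"))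
--     best = n
--     for i in range(n - k + 1):
--         best = min(best, pref[i + k] - pref[i])
--     return best
-- ===== Notes on version B (the rewrite author's own statement) =====
-- stated objective: faster
-- what changed: Replaces A's recount of every k-length window with a nested loop by a one-pass prefix-count table of 'w's followed by a single scan taking the minimum of prefix differences.
import Mathlib
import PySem

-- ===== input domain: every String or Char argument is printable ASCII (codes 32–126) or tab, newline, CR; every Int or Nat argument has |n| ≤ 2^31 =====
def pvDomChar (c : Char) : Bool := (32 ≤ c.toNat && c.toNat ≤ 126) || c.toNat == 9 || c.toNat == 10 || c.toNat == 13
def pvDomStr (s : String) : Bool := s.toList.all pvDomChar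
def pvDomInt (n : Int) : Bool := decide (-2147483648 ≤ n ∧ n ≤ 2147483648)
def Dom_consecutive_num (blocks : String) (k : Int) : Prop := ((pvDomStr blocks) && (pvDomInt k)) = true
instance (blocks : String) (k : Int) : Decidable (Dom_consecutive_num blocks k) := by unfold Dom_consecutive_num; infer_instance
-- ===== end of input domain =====

-- B replaces A's per-window recount (O(n·k)) with a one-pass prefix-count table and a
-- single scan of window differences (O(n)); return value only, no mutation.

-- ===== PORT A =====
def consecutive_num (blocks : String) (k : Int) : Int :=
  let cs := blocks.toList
  let strLen : Int := (cs.length : Int)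
  (PySem.List.pyRange 0 (strLen - k + 1) 1).foldl
    (fun sum i =>
      let currCount := (PySem.List.pyRange i (i + k) 1).foldl
        (fun cc j => if PySem.List.pyGet? cs j = some 'w' then cc + 1 else cc) 0
      min sum currCount)
    strLen

-- ===== PORT B =====
def consecutive_num_alt (blocks : String) (k : Int) : Int :=
  let cs := blocks.toList
  let n : Int := (cs.length : Int)
  if k ≤ 0 then 0
  else
    let pref : List Int := cs.foldl
      (fun pref ch => pref ++ [PySem.List.pyGetD pref (-1) 0 + (if ch = 'w' then 1 else 0)]) [0]
    (PySem.List.pyRange 0 (n - k + 1) 1).foldl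
      (fun best i => min best (PySem.List.pyGetD pref (i + k) 0 - PySem.List.pyGetD pref i 0)) n

-- ===== PRECONDITION & SPEC =====
def Spec_consecutive_num (blocks : String) (k : Int) (out : Int) : Prop := out = consecutive_num_alt blocks k
instance (blocks : String) (k : Int) (out : Int) : Decidable (Spec_consecutive_num blocks k out) := by unfold Spec_consecutive_num; infer_instance

-- ===== CLAIM (what is proved, stated in full; the proofs are below) =====
def Claim_equal_consecutive_num : Prop := ∀ (blocks : String) (k : Int), Dom_consecutive_num blocks k → Spec_consecutive_num blocks k (consecutive_num blocks k)

-- ===== LEMMAS AND PROOFS =====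

/-- Per-character contribution: 1 for 'w', else 0. -/
def wI (c : Char) : Int := if c = 'w' then 1 else 0

/-- Number of 'w's in a character list, as an Int. -/
def cnt (l : List Char) : Int := (l.countP (· == 'w') : Int)

/-- Running prefix counts produced after value `v`. -/
def scanC (v : Int) : List Char → List Int
  | [] => []
  | c :: cs => (v + wI c) :: scanC (v + wI c) cs

theorem cnt_cons (c : Char) (l : List Char) : cnt (c :: l) = wI c + cnt l := by
  simp [cnt, wI, List.countP_cons]
  by_cases h : c = 'w' <;> simp [h] <;> omega

theorem cnt_append (a b : List Char) : cnt (a ++ b) = cnt a + cnt b := by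
  simp [cnt, List.countP_append]

theorem pref_build (cs : List Char) (pre : List Int) (v : Int) :
    cs.foldl (fun pref ch => pref ++ [PySem.List.pyGetD pref (-1) 0 + (if ch = 'w' then 1 else 0)]) (pre ++ [v])
      = pre ++ v :: scanC v cs := by
  induction cs generalizing pre v with
  | nil => simp [scanC]
  | cons c cs ih =>
    simp only [List.foldl_cons, PySem.List.pyGetD_neg_one_append_singleton]
    rw [ih (pre ++ [v]) (v + (if c = 'w' then 1 else 0))]
    simp [scanC, wI]

theorem scan_getD (cs : List Char) (v : Int) (j : Nat) (hj : j ≤ cs.length) :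
    (v :: scanC v cs).getD j 0 = v + cnt (cs.take j) := by
  induction cs generalizing v j with
  | nil =>
    have hj0 : j = 0 := by simpa using hj
    subst hj0
    simp [cnt]
  | cons c cs ih =>
    cases j with
    | zero => simp [cnt]
    | succ j =>
      simp only [List.getD_cons_succ, scanC, List.take_succ_cons, cnt_cons]
      rw [ih (v + wI c) j (by simpa using hj)]
      ring

/-- A's inner loop counts 'w's in the window `[i, i+m)`. -/
theorem countLoop (cs : List Char) (m : Nat) (i a : Int) (h0 : 0 ≤ i)
    (hle : i.toNat + m ≤ cs.length) :
    (PySem.List.pyRange i (i + (m : Int)) 1).foldl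
        (fun cc j => if PySem.List.pyGet? cs j = some 'w' then cc + 1 else cc) a
      = a + cnt ((cs.drop i.toNat).take m) := by
  induction m generalizing i a with
  | zero =>
    rw [show i + ((0:Nat):Int) = i by simp, PySem.List.pyRange_one_eq_nil le_rfl]
    simp [cnt]
  | succ m ih =>
    rw [PySem.List.pyRange_one_cons (by omega : i < i + ((m+1 : Nat) : Int))]
    simp only [List.foldl_cons]
    have hib : i.toNat < cs.length := by omega
    have harg : i + ((m+1 : Nat) : Int) = (i + 1) + (m : Int) := by push_cast; ring
    rw [harg, ih (i + 1) _ (by omega) (by omega)]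
    have hget : PySem.List.pyGet? cs i = some cs[i.toNat] :=
      PySem.List.pyGet?_eq_some_getElem cs h0 (by omega)
    have hdrop : cs.drop i.toNat = cs[i.toNat] :: cs.drop (i.toNat + 1) :=
      List.drop_eq_getElem_cons hib
    have h1 : (i + 1).toNat = i.toNat + 1 := by omega
    rw [hdrop, List.take_succ_cons, cnt_cons, hget, h1]
    by_cases hw : cs[i.toNat] = 'w' <;> simp [hw, wI] <;> ring

theorem foldl_min_zero (l : List Int) (s : Int) (hs : s ≤ 0) :
    l.foldl (fun s _ => min s 0) s = s := by
  induction l generalizing s with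
  | nil => rfl
  | cons x l ih => simp only [List.foldl_cons]; rw [min_eq_left hs]; exact ih s hs

-- ===== VERDICT (by name: the statement is the Claim_ definition above) =====
theorem consecutive_num_spec : Claim_equal_consecutive_num := by
  intro blocks k _
  unfold Spec_consecutive_num consecutive_num consecutive_num_alt
  dsimp only
  by_cases hk : k ≤ 0
  · -- every window is empty; the outer fold drives the minimum to 0
    rw [if_pos hk]
    rw [PySem.List.foldl_congr_mem _ _ (fun (sum : Int) (_ : Int) => min sum 0) _
      (by
        intro sum i _
        dsimp only
        rw [PySem.List.pyRange_one_eq_nil (by omega : i + k ≤ i)]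
        rfl)]
    rw [PySem.List.pyRange_one_cons (by omega : (0:Int) < (blocks.toList.length : Int) - k + 1)]
    simp only [List.foldl_cons]
    rw [min_eq_right (by omega : (0:Int) ≤ (blocks.toList.length : Int))]
    exact foldl_min_zero _ 0 le_rfl
  · rw [if_neg hk]
    obtain ⟨m, rfl⟩ : ∃ m : ℕ, k = (m : Int) := ⟨k.toNat, by omega⟩
    have hpref : blocks.toList.foldl
        (fun pref ch => pref ++ [PySem.List.pyGetD pref (-1) 0 + (if ch = 'w' then 1 else 0)]) [0]
        = 0 :: scanC 0 blocks.toList := by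
      simpa using pref_build blocks.toList [] 0
    rw [hpref]
    refine PySem.List.foldl_congr_mem _ _ _ _ ?_
    intro acc i hi
    rw [PySem.List.mem_pyRange_one] at hi
    obtain ⟨hi0, hiu⟩ := hi
    obtain ⟨a, rfl⟩ : ∃ a : ℕ, i = (a : Int) := ⟨i.toNat, by omega⟩
    have hgd : ∀ (j : ℕ), j ≤ blocks.toList.length →
        PySem.List.pyGetD (0 :: scanC 0 blocks.toList) (j : Int) 0 = cnt (blocks.toList.take j) := by
      intro j hj
      rw [PySem.List.pyGetD_natCast, scan_getD blocks.toList 0 j hj]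
      ring
    rw [countLoop blocks.toList m (a : Int) 0 (by omega) (by omega)]
    have hak : ((a : Int) + (m : Int)) = (((a + m : ℕ) : Int)) := by push_cast; ring
    rw [hak, hgd (a + m) (by omega), hgd a (by omega)]
    simp only [Int.toNat_natCast]
    rw [List.take_add, cnt_append]
    ring_nf
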